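-- pv_equiv track=rewrite | github.com/gaoyifan/backup-cards | main.py | normalize_ext_list
-- ===== SOURCE A (Python) =====
-- def normalize_ext_list(raw: str) -> list[str]:
--     if not raw:
--         return []
--     text = raw
--     for sep in [",", ";", " "]:
--         text = text.replace(sep, ",")
--     tokens = [token.strip() for token in text.split(",")]
--     out: list[str] = []
--     for token in tokens:
--         if not token:
--             continue
--         if token.startswith("*."):
--             token = token[2:]
--         if token.startswith("."):
--             token = token[1:]
--         if token:
--             out.append(token)
--     return out
-- ===== SOURCE B (Python) =====
-- def normalize_ext_list(raw: str) -> list[str]: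
--     # Single left-to-right scan: accumulate the current token, flush on any
--     # separator (a sentinel trailing "," flushes the last token).
--     out: list[str] = []
--     cur: list[str] = []
--     for ch in raw + ",":
--         if ch in ",; ":
--             token = "".join(cur).strip().removeprefix("*.").removeprefix(".")
--             cur = []
--             if token:
--                 out.append(token)
--         else:
--             cur.append(ch)
--     return out
-- ===== Notes on version B (the rewrite author's own statement) =====
-- stated objective: alternative
-- what changed: Replaces A's three replace passes + split + per-token loop with a single left-to-right character scan that flushes the accumulated token at each separator (with a sentinel trailing comma), normalizing prefixes via a strip/removeprefix chain.
import Mathlib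
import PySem

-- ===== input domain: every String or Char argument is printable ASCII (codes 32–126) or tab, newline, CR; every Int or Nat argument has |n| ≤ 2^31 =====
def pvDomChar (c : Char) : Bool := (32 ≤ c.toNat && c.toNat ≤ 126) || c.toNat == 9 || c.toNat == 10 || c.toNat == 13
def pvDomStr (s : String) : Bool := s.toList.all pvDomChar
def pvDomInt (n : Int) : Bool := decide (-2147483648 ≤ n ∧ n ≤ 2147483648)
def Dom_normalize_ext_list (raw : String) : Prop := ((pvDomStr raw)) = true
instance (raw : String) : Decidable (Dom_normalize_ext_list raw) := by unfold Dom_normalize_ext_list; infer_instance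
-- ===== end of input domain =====

-- B replaces A's three replace passes + split + per-token loop by a single
-- left-to-right character scan flushing the current token at each separator
-- (objective: alternative decomposition, same asymptotic cost).

-- ===== PORT A =====
-- per-token body of A's `for token in tokens` loop (branches in A's order)
def pvAStep (out : List String) (token : List Char) : List String :=
  if token = [] then out
  else
    let token1 := if PySem.Chars.startswith token ['*', '.'] then PySem.Chars.slice token (some 2) none else token
    let token2 := if PySem.Chars.startswith token1 ['.'] then PySem.Chars.slice token1 (some 1) none else token1
    if token2 ≠ [] then out ++ [String.ofList token2] else out

def normalize_ext_list (raw : String) : List String :=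
  if raw.toList = [] then []                  -- `if not raw: return []`
  else
    let text := [[','], [';'], [' ']].foldl (fun t sep => PySem.Chars.replace t sep [',']) raw.toList
    let tokens := (PySem.Chars.splitOn text [',']).map PySem.Chars.strip
    tokens.foldl pvAStep []

-- ===== PORT B =====
-- `"".join(cur).strip().removeprefix("*.").removeprefix(".")`
-- (str.removeprefix ported by hand, exact: drop the prefix iff it is present)
def pvFlush (cur : List Char) : List Char :=
  let t := PySem.Chars.strip cur
  let t1 := if ['*', '.'].isPrefixOf t then t.drop 2 else t
  if ['.'].isPrefixOf t1 then t1.drop 1 else t1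

-- the `for ch in raw + ","` scan of B, with cur/out as the loop state
def pvScan : List Char → List Char → List String → List String
  | [], _cur, out => out
  | c :: rest, cur, out =>
    if c = ',' ∨ c = ';' ∨ c = ' ' then      -- `ch in ",; "`
      let t := pvFlush cur
      pvScan rest [] (if t ≠ [] then out ++ [String.ofList t] else out)
    else
      pvScan rest (cur ++ [c]) out

def normalize_ext_list_alt (raw : String) : List String :=
  pvScan (raw.toList ++ [',']) [] []

-- ===== PRECONDITION & SPEC =====
def Spec_normalize_ext_list (raw : String) (out : List String) : Prop := out = normalize_ext_list_alt raw
instance (raw : String) (out : List String) : Decidable (Spec_normalize_ext_list raw out) := by unfold Spec_normalize_ext_list; infer_instance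

-- ===== CLAIM (what is proved, stated in full; the proofs are below) =====
def Claim_equal_normalize_ext_list : Prop := ∀ (raw : String), Dom_normalize_ext_list raw → Spec_normalize_ext_list raw (normalize_ext_list raw)

-- ===== LEMMAS AND PROOFS =====

-- what A's replace chain does to a single character
def pvF (c : Char) : Char := if c = ',' ∨ c = ';' ∨ c = ' ' then ',' else c

-- splitting on ',' with an accumulator (shape of both sides after rewriting)
def pvMsAux : List Char → List Char → List (List Char)
  | [], cur => [cur.reverse]
  | c :: rest, cur => if c = ',' then cur.reverse :: pvMsAux rest [] else pvMsAux rest (c :: cur)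

-- the contribution of one raw token to the output
def pvProc (t : List Char) : List String :=
  if pvFlush t = [] then [] else [String.ofList (pvFlush t)]

lemma pvReplace_go_single (a b : Char) :
    ∀ (l : List Char) (fuel : Nat) (acc : List Char), l.length ≤ fuel →
    PySem.Chars.replace.go [a] [b] fuel l acc
      = acc.reverse ++ l.map (fun c => if c = a then b else c) := by
  intro l
  induction l with
  | nil =>
    intro fuel acc _
    cases fuel <;> simp [PySem.Chars.replace.go]
  | cons c t ih =>
    intro fuel acc h
    cases fuel with
    | zero => simp at h
    | succ n =>
      by_cases hc : a = c
      · subst hc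
        simp [PySem.Chars.replace.go, List.isPrefixOf,
          ih n (b :: acc) (by simpa using h)]
      · simp [PySem.Chars.replace.go, List.isPrefixOf, hc, Ne.symm hc,
          ih n (c :: acc) (by simpa using h)]

lemma pvReplace_single (a b : Char) (l : List Char) :
    PySem.Chars.replace l [a] [b] = l.map (fun c => if c = a then b else c) := by
  simpa [PySem.Chars.replace] using pvReplace_go_single a b l l.length [] le_rfl

lemma pvReplace_chain (l : List Char) :
    [[','], [';'], [' ']].foldl (fun t sep => PySem.Chars.replace t sep [',']) l = l.map pvF := by
  simp only [List.foldl, pvReplace_single, List.map_map]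
  refine List.map_congr_left (fun c _ => ?_)
  by_cases h1 : c = ',' <;> by_cases h2 : c = ';' <;> by_cases h3 : c = ' ' <;>
    simp [pvF, h1, h2, h3]

lemma pvSplitOn_go_comma :
    ∀ (l : List Char) (fuel : Nat) (cur : List Char) (acc : List (List Char)),
    l.length < fuel →
    PySem.Chars.splitOn.go [','] fuel l cur acc = acc.reverse ++ pvMsAux l cur := by
  intro l
  induction l with
  | nil =>
    intro fuel cur acc h
    cases fuel with
    | zero => omega
    | succ n => simp [PySem.Chars.splitOn.go, pvMsAux]
  | cons c t ih =>
    intro fuel cur acc h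
    cases fuel with
    | zero => omega
    | succ n =>
      by_cases hc : c = ','
      · simp [PySem.Chars.splitOn.go, List.isPrefixOf, hc, pvMsAux,
          ih n [] (cur.reverse :: acc) (by simpa using h)]
      · simp [PySem.Chars.splitOn.go, List.isPrefixOf, hc, Ne.symm hc, pvMsAux,
          ih n (c :: cur) acc (by simpa using h)]

lemma pvSplitOn_comma (l : List Char) :
    PySem.Chars.splitOn l [','] = pvMsAux l [] := by
  simpa [PySem.Chars.splitOn] using pvSplitOn_go_comma l (l.length + 1) [] [] (by omega)

-- A's loop body applied to an already-stripped token = pvProc of the raw token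
lemma pvAStep_strip (out : List String) (t : List Char) :
    pvAStep out (PySem.Chars.strip t) = out ++ pvProc t := by
  unfold pvAStep pvProc pvFlush
  by_cases h0 : PySem.Chars.strip t = []
  · simp [h0]
  · simp only [h0, PySem.Chars.startswith]
    have hsl2 : ∀ (s : List Char), PySem.Chars.slice s (some 2) none = s.drop 2 := by
      intro s
      simp [pysem]
    have hsl1 : ∀ (s : List Char), PySem.Chars.slice s (some 1) none = s.drop 1 := by
      intro s
      simp [pysem]
    split_ifs with h1 h2 h3 h4 h5 h6 h7 <;>
      simp_all [hsl2, hsl1] <;> omega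

lemma pvA_loop (ts : List (List Char)) :
    ∀ (out : List String),
    (ts.map PySem.Chars.strip).foldl pvAStep out = out ++ ts.flatMap pvProc := by
  induction ts with
  | nil => intro out; simp
  | cons t ts ih =>
    intro out
    simp [List.foldl_cons, pvAStep_strip, ih, List.flatMap_cons]

lemma pvScan_spec :
    ∀ (l cur : List Char) (out : List String),
    pvScan (l ++ [',']) cur out = out ++ (pvMsAux (l.map pvF) cur.reverse).flatMap pvProc := by
  intro l
  induction l with
  | nil =>
    intro cur out
    simp [pvScan, pvMsAux, pvProc]
    split_ifs <;> simp_all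
  | cons c l ih =>
    intro cur out
    by_cases hsep : c = ',' ∨ c = ';' ∨ c = ' '
    · have hf : pvF c = ',' := by simp [pvF, hsep]
      simp only [List.cons_append, pvScan, if_pos hsep, List.map_cons, hf, pvMsAux,
        List.reverse_reverse]
      rw [ih [] (if pvFlush cur ≠ [] then out ++ [String.ofList (pvFlush cur)] else out)]
      simp [pvProc]
      split_ifs <;> simp_all
    · have hf : pvF c = c := by simp [pvF, hsep]
      have hc : c ≠ ',' := fun h => hsep (Or.inl h)
      simp only [List.cons_append, pvScan, if_neg hsep, List.map_cons, hf, pvMsAux,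
        if_neg hc]
      rw [ih (cur ++ [c]) out]
      simp

lemma pvAlt_eq (raw : String) :
    normalize_ext_list_alt raw = (pvMsAux (raw.toList.map pvF) []).flatMap pvProc := by
  simpa using pvScan_spec raw.toList [] []

-- ===== VERDICT (by name: the statement is the Claim_ definition above) =====
theorem normalize_ext_list_spec : Claim_equal_normalize_ext_list := by
  intro raw _
  unfold Spec_normalize_ext_list
  rw [pvAlt_eq]
  unfold normalize_ext_list
  by_cases h : raw.toList = []
  · simp [h, pvMsAux, pvProc, pvFlush, PySem.Chars.strip, PySem.Chars.lstrip,
      PySem.Chars.rstrip]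
  · simp only [if_neg h, pvReplace_chain, pvSplitOn_comma, pvA_loop, List.nil_append]
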